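-- pv_equiv track=rewrite | github.com/MengQingming2020/learn_python | BinaryChopInRotationArray.py | find_cut
-- ===== SOURCE A (Python) =====
-- def find_cut(nums, first, last):
--     '''找出数组nums中第一个小于nums[0]的元素的索引，并返回'''
--
--     while first <= last:
--         middle = first + ((last - first)>>1)
--         if nums[middle] > nums[first]:
--             if nums[first] > nums[last]:    #在有旋转的升序数组中
--                 first = middle + 1
--             else:   #在没有旋转的升序数组中
--                 return first
--
--         elif nums[middle] < nums[first]:
--
--             if nums[middle - 1] >= nums[first]: #如果前一个节点大于nums[first],或者前一个节点就是nums[first]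
--                 return middle
--             else:   #若nums[middle - 1] < nums[first],说明分界点在middle左侧
--                 last = middle - 1
--         else:   #
--             if first == last:   #只剩一个元素
--                 return first
--             elif middle == first and nums[middle + 1] < nums[first]:    #只剩两个元素
--                 return middle + 1
--             else:   #剩余元素个数大于2的普通情况
--                 return middle
-- ===== SOURCE B (Python) =====
-- def find_cut(nums, first, last):
--     '''找出数组nums中第一个小于nums[0]的元素的索引，并返回'''
--     if first > last:
--         return None
--     middle = first + (last - first) // 2
--     a, f = nums[middle], nums[first]
--     if a == f:
--         if first == last:
--             return first
--         if middle == first and nums[middle + 1] < f: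
--             return middle + 1
--         return middle
--     if a > f:
--         if f <= nums[last]:
--             return first
--         return find_cut(nums, middle + 1, last)
--     if nums[middle - 1] >= f:
--         return middle
--     return find_cut(nums, first, middle - 1)
-- ===== Notes on version B (the rewrite author's own statement) =====
-- stated objective: simpler
-- what changed: The mutable while-loop with nested if/elif/else is rewritten as a guard-clause recursion: the window is passed as arguments, the equality case is handled first, and every branch is an early return.
-- outside the precondition, e.g. on find_cut([1, 1], 0, 2): A returns 1, B returns 1
import Mathlib
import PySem

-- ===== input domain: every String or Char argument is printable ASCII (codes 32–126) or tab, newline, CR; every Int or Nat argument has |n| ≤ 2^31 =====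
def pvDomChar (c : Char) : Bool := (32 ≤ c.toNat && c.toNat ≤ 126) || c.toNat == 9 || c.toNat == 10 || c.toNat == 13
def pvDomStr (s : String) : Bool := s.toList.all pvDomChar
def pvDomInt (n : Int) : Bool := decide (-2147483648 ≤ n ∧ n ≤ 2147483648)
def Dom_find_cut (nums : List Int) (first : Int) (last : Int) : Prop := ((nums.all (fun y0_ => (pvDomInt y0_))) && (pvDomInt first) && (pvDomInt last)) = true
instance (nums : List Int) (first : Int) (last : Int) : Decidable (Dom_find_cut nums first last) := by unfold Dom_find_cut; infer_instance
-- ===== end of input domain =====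

-- B rewrites A's while-loop binary search as a guard-clause recursion (equal case first, early
-- returns, no mutable window): objective 'simpler'.  Where Python A raises IndexError both ports
-- return the dummy value none at the failing access (excluded by Pre_find_cut).

-- ===== PORT A =====
-- Literal port of A's while-loop as structural recursion on the window size; each nums[i]
-- is PySem.List.pyGet? (none = IndexError, dummy result none there); (last-first)>>1 with
-- last-first ≥ 0 is exactly floordiv by 2.
def find_cut (nums : List Int) (first : Int) (last : Int) : Option Int :=
  if _hle : first ≤ last then
    let middle := first + PySem.Int.floordiv (last - first) 2
    match PySem.List.pyGet? nums middle, PySem.List.pyGet? nums first with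
    | some nm, some nf =>
      if nm > nf then
        match PySem.List.pyGet? nums last with
        | some nl => if nf > nl then find_cut nums (middle + 1) last else some first
        | none => none
      else if nm < nf then
        match PySem.List.pyGet? nums (middle - 1) with
        | some np => if np ≥ nf then some middle else find_cut nums first (middle - 1)
        | none => none
      else
        if first = last then some first
        else if middle = first then
          match PySem.List.pyGet? nums (middle + 1) with
          | some nn => if nn < nf then some (middle + 1) else some middle
          | none => none
        else some middle
    | _, _ => none
  else none
termination_by (last + 1 - first).toNat
decreasing_by
  · rw [PySem.Int.floordiv_eq_ediv_of_pos (by omega : (0:Int) < 2)] at *; omega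
  · rw [PySem.Int.floordiv_eq_ediv_of_pos (by omega : (0:Int) < 2)] at *; omega

-- ===== PORT B =====
-- Port of Source B: guard-clause recursion, equality case first, Option.bind for each access.
def find_cut_alt (nums : List Int) (first : Int) (last : Int) : Option Int :=
  if hgt : last < first then none
  else
    let middle := first + PySem.Int.floordiv (last - first) 2
    (PySem.List.pyGet? nums middle).bind fun a =>
    (PySem.List.pyGet? nums first).bind fun f =>
      if a = f then
        if first = last then some first
        else if middle = first then
          (PySem.List.pyGet? nums (middle + 1)).bind fun nxt =>
            if nxt < f then some (middle + 1) else some middle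
        else some middle
      else if a > f then
        (PySem.List.pyGet? nums last).bind fun l =>
          if f ≤ l then some first else find_cut_alt nums (middle + 1) last
      else
        (PySem.List.pyGet? nums (middle - 1)).bind fun p =>
          if p ≥ f then some middle else find_cut_alt nums first (middle - 1)
termination_by (last + 1 - first).toNat
decreasing_by
  · rw [PySem.Int.floordiv_eq_ediv_of_pos (by omega : (0:Int) < 2)] at *; omega
  · rw [PySem.Int.floordiv_eq_ediv_of_pos (by omega : (0:Int) < 2)] at *; omega

-- ===== PRECONDITION & SPEC =====
-- Pre_ excludes windows with first ≤ last that reach outside Python's index range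
-- [-len, len): there A normally raises IndexError; on a few such inputs the probed
-- indices happen to stay in range and A returns a value (which B returns as well).
def Pre_find_cut (nums : List Int) (first : Int) (last : Int) : Prop :=
  last < first ∨ (-(nums.length : Int) ≤ first ∧ first ≤ last ∧ last < nums.length)
instance (nums : List Int) (first : Int) (last : Int) : Decidable (Pre_find_cut nums first last) := by unfold Pre_find_cut; infer_instance

def pvWitness_find_cut : List Int × Int × Int := ([3, 4, 5, 1, 2], 0, 4)

def Spec_find_cut (nums : List Int) (first : Int) (last : Int) (out : Option Int) : Prop := out = find_cut_alt nums first last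
instance (nums : List Int) (first : Int) (last : Int) (out : Option Int) : Decidable (Spec_find_cut nums first last out) := by unfold Spec_find_cut; infer_instance

-- ===== CLAIM (what is proved, stated in full; the proofs are below) =====
def Claim_equal_find_cut : Prop := ∀ (nums : List Int) (first : Int) (last : Int), Dom_find_cut nums first last → Pre_find_cut nums first last → Spec_find_cut nums first last (find_cut nums first last)

-- ===== LEMMAS AND PROOFS =====

-- The two ports agree on every input (both model an IndexError access as result none).
theorem find_cut_eq_alt (nums : List Int) (n : Nat) (first last : Int)
    (hn : (last + 1 - first).toNat ≤ n) :
    find_cut nums first last = find_cut_alt nums first last := by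
  induction n generalizing first last with
  | zero =>
    have hlt : last < first := by omega
    rw [find_cut, find_cut_alt]
    simp [hlt, show ¬ first ≤ last by omega]
  | succ n ih =>
    by_cases hle : first ≤ last
    · rw [find_cut, find_cut_alt]
      have hmid := PySem.Int.floordiv_eq_ediv_of_pos (by omega : (0:Int) < 2) (a := last - first)
      simp only [dif_pos hle, dif_neg (show ¬ last < first by omega)]
      set m : Int := first + PySem.Int.floordiv (last - first) 2 with hm
      have hmb : first ≤ m ∧ m ≤ last := by rw [hm, hmid]; omega
      cases hgm : PySem.List.pyGet? nums m with
      | none => simp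
      | some a =>
        cases hgf : PySem.List.pyGet? nums first with
        | none => simp
        | some f =>
          simp only [Option.bind_some]
          rcases lt_trichotomy a f with h | h | h
          · -- a < f : A's elif branch, B's last guard
            simp only [if_neg (by omega : ¬ a > f), if_pos (by omega : a < f), if_neg (by omega : ¬ a = f)]
            cases hgp : PySem.List.pyGet? nums (m - 1) with
            | none => simp
            | some p =>
              simp only [Option.bind_some]
              by_cases hpf : p ≥ f
              · simp [hpf]
              · simp only [if_neg hpf]
                exact ih first (m - 1) (by omega)
          · -- a = f
            simp only [if_neg (by omega : ¬ a > f), if_neg (by omega : ¬ a < f), if_pos h]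
            by_cases hfl3 : first = last
            · simp [hfl3]
            · simp only [if_neg hfl3]
              by_cases hmf : m = first
              · simp only [if_pos hmf]
                cases PySem.List.pyGet? nums (m + 1) <;> simp
              · simp [hmf]
          · -- a > f
            simp only [if_pos (by omega : a > f), if_neg (by omega : ¬ a = f)]
            cases hgl : PySem.List.pyGet? nums last with
            | none => simp
            | some l =>
              simp only [Option.bind_some]
              by_cases hfl2 : f > l
              · simp only [if_pos hfl2, if_neg (by omega : ¬ f ≤ l)]
                exact ih (m + 1) last (by omega)
              · simp only [if_neg hfl2, if_pos (by omega : f ≤ l)]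
    · rw [find_cut, find_cut_alt]
      simp [hle, show last < first by omega]

-- ===== VERDICT (by name: the statement is the Claim_ definition above) =====
theorem find_cut_spec : Claim_equal_find_cut := by
  intro nums first last _ _
  unfold Spec_find_cut
  exact find_cut_eq_alt nums (last + 1 - first).toNat first last le_rfl
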